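-- pv_equiv track=rewrite | github.com/PilotChalkanov/python_advanced_softUni_module | 05_matrixes_excersises/Excersices/shootoing_range.py | shooting
-- ===== SOURCE A (Python) =====
-- def shooting(command, position, matrix, targets, targets_shot):
--     y, x = position
--
--     if command == 'right':
--         for col in range(x, len(matrix)):
--             if matrix[y][col] == 'x':
--                 matrix[y][col] = '.'
--                 targets.remove((y, col))
--                 targets_shot.append((y, col))
--                 break
--     elif command == 'left':
--         for col in range(x, 0, -1):
--             if matrix[y][col] == 'x':
--                 matrix[y][col] = '.'
--                 targets.remove((y, col))
--                 targets_shot.append((y, col))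
--                 break
--     elif command == 'down':
--         for row in range(y, len(matrix)):
--             if matrix[row][x] == 'x':
--                 matrix[row][x] = '.'
--                 targets.remove((row, x))
--                 targets_shot.append((row, x))
--                 break
--     elif command == 'up':
--         for row in range(y, 0, -1):
--             if matrix[row][x] == 'x':
--                 matrix[row][x] = '.'
--                 targets.remove((row, x))
--                 targets_shot.append((row, x))
--                 break
--     return targets, targets_shot
-- ===== SOURCE B (Python) =====
-- def _cell(matrix, r, c):
--     if -len(matrix) <= r < len(matrix):
--         row = matrix[r]
--         if -len(row) <= c < len(row):
--             return row[c]
--     return None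
--
--
-- def shooting(command, position, matrix, targets, targets_shot):
--     y, x = position
--     n = len(matrix)
--     dy, dx, steps = {
--         'right': (0, 1, n - x),
--         'left': (0, -1, x),
--         'down': (1, 0, n - y),
--         'up': (-1, 0, y),
--     }.get(command, (0, 0, 0))
--     cells = [(y + k * dy, x + k * dx) for k in range(steps)]
--     values = [_cell(matrix, r, c) for r, c in cells]
--     if 'x' in values:
--         p = cells[values.index('x')]
--         matrix[p[0]][p[1]] = '.'
--         targets.remove(p)
--         targets_shot.append(p)
--     return targets, targets_shot
-- ===== Notes on version B (the rewrite author's own statement) =====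
-- stated objective: simpler
-- what changed: A's four copy-pasted direction loops (scan, mutate, break) are replaced by a direction-vector table (dy, dx, steps) that generates the scanned positions arithmetically, a total bounds-checked cell reader materialising all scanned values, and a single index-of lookup locating the hit before one shared update step.
import Mathlib
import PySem

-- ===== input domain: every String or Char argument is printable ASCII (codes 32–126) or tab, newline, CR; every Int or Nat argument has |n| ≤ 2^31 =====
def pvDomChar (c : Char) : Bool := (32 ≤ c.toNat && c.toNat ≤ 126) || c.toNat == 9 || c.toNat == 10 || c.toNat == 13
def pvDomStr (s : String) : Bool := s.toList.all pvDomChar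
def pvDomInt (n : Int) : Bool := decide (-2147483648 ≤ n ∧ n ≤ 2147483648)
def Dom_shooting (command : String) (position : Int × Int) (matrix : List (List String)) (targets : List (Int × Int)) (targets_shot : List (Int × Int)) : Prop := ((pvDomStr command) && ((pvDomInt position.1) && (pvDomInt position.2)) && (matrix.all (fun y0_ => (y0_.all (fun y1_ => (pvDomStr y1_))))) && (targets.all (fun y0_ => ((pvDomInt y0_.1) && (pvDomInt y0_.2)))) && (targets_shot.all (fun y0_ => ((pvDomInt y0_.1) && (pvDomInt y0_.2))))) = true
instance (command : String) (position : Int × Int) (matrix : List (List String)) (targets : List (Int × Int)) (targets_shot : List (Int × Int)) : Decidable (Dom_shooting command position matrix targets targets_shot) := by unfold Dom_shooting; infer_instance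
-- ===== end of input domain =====

-- B replaces A's four copy-pasted scanning loops by a direction-vector parametrization (dy, dx, steps):
-- it materialises the scanned cell values once and locates the hit with a single index-of lookup,
-- then performs one shared update; objective: simpler. A mutates matrix/targets/targets_shot in place
-- and B performs the same mutations; the equivalence proved here is about the RETURN value.

-- ===== PORT A =====
-- one helper per Python for-loop, transliterated; 'none' from an index access means the Python raised
-- IndexError there (outside Pre_), the helper then returns the state unchanged as junk
def shootRight (y : Int) (matrix : List (List String)) (targets targets_shot : List (Int × Int)) : List Int → (List (Int × Int)) × (List (Int × Int))
  | [] => (targets, targets_shot)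
  | col :: rest =>
    match (PySem.List.pyGet? matrix y).bind (fun row => PySem.List.pyGet? row col) with
    | none => (targets, targets_shot)
    | some s =>
      if s = "x" then ((PySem.List.remove? targets (y, col)).getD targets, targets_shot ++ [(y, col)])
      else shootRight y matrix targets targets_shot rest

def shootLeft (y : Int) (matrix : List (List String)) (targets targets_shot : List (Int × Int)) : List Int → (List (Int × Int)) × (List (Int × Int))
  | [] => (targets, targets_shot)
  | col :: rest =>
    match (PySem.List.pyGet? matrix y).bind (fun row => PySem.List.pyGet? row col) with
    | none => (targets, targets_shot)
    | some s =>
      if s = "x" then ((PySem.List.remove? targets (y, col)).getD targets, targets_shot ++ [(y, col)])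
      else shootLeft y matrix targets targets_shot rest

def shootDown (x : Int) (matrix : List (List String)) (targets targets_shot : List (Int × Int)) : List Int → (List (Int × Int)) × (List (Int × Int))
  | [] => (targets, targets_shot)
  | row :: rest =>
    match (PySem.List.pyGet? matrix row).bind (fun r => PySem.List.pyGet? r x) with
    | none => (targets, targets_shot)
    | some s =>
      if s = "x" then ((PySem.List.remove? targets (row, x)).getD targets, targets_shot ++ [(row, x)])
      else shootDown x matrix targets targets_shot rest

def shootUp (x : Int) (matrix : List (List String)) (targets targets_shot : List (Int × Int)) : List Int → (List (Int × Int)) × (List (Int × Int))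
  | [] => (targets, targets_shot)
  | row :: rest =>
    match (PySem.List.pyGet? matrix row).bind (fun r => PySem.List.pyGet? r x) with
    | none => (targets, targets_shot)
    | some s =>
      if s = "x" then ((PySem.List.remove? targets (row, x)).getD targets, targets_shot ++ [(row, x)])
      else shootUp x matrix targets targets_shot rest

def shooting (command : String) (position : Int × Int) (matrix : List (List String)) (targets : List (Int × Int)) (targets_shot : List (Int × Int)) : (List (Int × Int)) × (List (Int × Int)) :=
  let y := position.1
  let x := position.2
  if command = "right" then shootRight y matrix targets targets_shot (PySem.List.pyRange x (matrix.length : Int) 1)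
  else if command = "left" then shootLeft y matrix targets targets_shot (PySem.List.pyRange x 0 (-1))
  else if command = "down" then shootDown x matrix targets targets_shot (PySem.List.pyRange y (matrix.length : Int) 1)
  else if command = "up" then shootUp x matrix targets targets_shot (PySem.List.pyRange y 0 (-1))
  else (targets, targets_shot)

-- ===== PORT B =====
-- _cell: the bounds-checked (negative-wrap) element access returning None when out of range;
-- exactly Python's xs[i] made total, i.e. pyGet? on both levels
def pvBcell (matrix : List (List String)) (r c : Int) : Option String :=
  (PySem.List.pyGet? matrix r).bind (fun row => PySem.List.pyGet? row c)

def shooting_alt (command : String) (position : Int × Int) (matrix : List (List String)) (targets : List (Int × Int)) (targets_shot : List (Int × Int)) : (List (Int × Int)) × (List (Int × Int)) :=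
  let y := position.1
  let x := position.2
  let n : Int := (matrix.length : Int)
  let dds : Int × Int × Int := PySem.Dict.getD (PySem.Dict.ofList
      [("right", ((0 : Int), (1 : Int), n - x)), ("left", (0, -1, x)),
       ("down", (1, 0, n - y)), ("up", (-1, 0, y))]) command (0, 0, 0)
  let cells := (PySem.List.pyRange 0 dds.2.2 1).map (fun k => (y + k * dds.1, x + k * dds.2.1))
  let values := cells.map (fun p => pvBcell matrix p.1 p.2)
  -- "if 'x' in values: p = cells[values.index('x')]" — membership + index is one index? match
  match PySem.List.index? values (some "x") with
  | some i =>
    let p := PySem.List.pyGetD cells (i : Int) ((0 : Int), (0 : Int))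
    ((PySem.List.remove? targets p).getD targets, targets_shot ++ [p])
  | none => (targets, targets_shot)

-- ===== PRECONDITION & SPEC =====
-- Pre_-only helper: the cell the scan reads at a position
def pvCell (matrix : List (List String)) (p : Int × Int) : Option String :=
  (PySem.List.pyGet? matrix p.1).bind (fun row => PySem.List.pyGet? row p.2)

-- a scan over ps returns normally iff every position before (and at) the first 'x' is in range and
-- the first 'x', if hit, is a member of targets (list.remove would raise ValueError otherwise)
def pvPreScan (matrix : List (List String)) (targets : List (Int × Int)) (ps : List (Int × Int)) : Bool :=
  (List.range ps.length).all fun k =>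
    if (List.range k).all (fun j => pvCell matrix (ps.getD j (0, 0)) != some "x") then
      (pvCell matrix (ps.getD k (0, 0))).isSome &&
        (pvCell matrix (ps.getD k (0, 0)) != some "x" || targets.contains (ps.getD k (0, 0)))
    else true

-- Pre_ = exactly the inputs on which the Python A returns normally: no IndexError on a scanned cell
-- up to the first 'x', and the first 'x' (if any) is present in targets so remove succeeds
def Pre_shooting (command : String) (position : Int × Int) (matrix : List (List String)) (targets : List (Int × Int)) (targets_shot : List (Int × Int)) : Prop :=
  (command = "right" → pvPreScan matrix targets ((PySem.List.pyRange position.2 (matrix.length : Int) 1).map (fun c => (position.1, c))) = true) ∧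
  (command = "left" → pvPreScan matrix targets ((PySem.List.pyRange position.2 0 (-1)).map (fun c => (position.1, c))) = true) ∧
  (command = "down" → pvPreScan matrix targets ((PySem.List.pyRange position.1 (matrix.length : Int) 1).map (fun r => (r, position.2))) = true) ∧
  (command = "up" → pvPreScan matrix targets ((PySem.List.pyRange position.1 0 (-1)).map (fun r => (r, position.2))) = true)
instance (command : String) (position : Int × Int) (matrix : List (List String)) (targets : List (Int × Int)) (targets_shot : List (Int × Int)) : Decidable (Pre_shooting command position matrix targets targets_shot) := by unfold Pre_shooting; infer_instance

def pvWitness_shooting : String × (Int × Int) × List (List String) × (List (Int × Int)) × (List (Int × Int)) :=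
  ("right", (0, 0), [[".", "x"], [".", "."]], [(0, 1)], [])

def Spec_shooting (command : String) (position : Int × Int) (matrix : List (List String)) (targets : List (Int × Int)) (targets_shot : List (Int × Int)) (out : (List (Int × Int)) × (List (Int × Int))) : Prop := out = shooting_alt command position matrix targets targets_shot
instance (command : String) (position : Int × Int) (matrix : List (List String)) (targets : List (Int × Int)) (targets_shot : List (Int × Int)) (out : (List (Int × Int)) × (List (Int × Int))) : Decidable (Spec_shooting command position matrix targets targets_shot out) := by unfold Spec_shooting; infer_instance

-- ===== CLAIM (what is proved, stated in full; the proofs are below) =====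
def Claim_equal_shooting : Prop := ∀ (command : String) (position : Int × Int) (matrix : List (List String)) (targets : List (Int × Int)) (targets_shot : List (Int × Int)), Dom_shooting command position matrix targets targets_shot → Pre_shooting command position matrix targets targets_shot → Spec_shooting command position matrix targets targets_shot (shooting command position matrix targets targets_shot)

-- ===== LEMMAS AND PROOFS =====
-- proof-side view of A's loops: the first scanned position whose cell is 'x'
-- (none = no hit, or an out-of-range cell reached first — outside Pre_)
def firstHit (matrix : List (List String)) : List (Int × Int) → Option (Int × Int)
  | [] => none
  | p :: rest =>
    match pvCell matrix p with
    | none => none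
    | some s => if s = "x" then some p else firstHit matrix rest

-- each of A's four loops equals "look up the first hit of the mapped scan sequence, then update once"
theorem shootRight_eq (y : Int) (matrix : List (List String)) (targets targets_shot : List (Int × Int)) (cols : List Int) :
    shootRight y matrix targets targets_shot cols =
      match firstHit matrix (cols.map (fun c => (y, c))) with
      | some p => ((PySem.List.remove? targets p).getD targets, targets_shot ++ [p])
      | none => (targets, targets_shot) := by
  induction cols with
  | nil => simp [shootRight, firstHit]
  | cons c rest ih =>
    simp only [shootRight, firstHit, List.map_cons, pvCell]
    cases h : (PySem.List.pyGet? matrix y).bind (fun row => PySem.List.pyGet? row c) with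
    | none => simp
    | some s => by_cases hs : s = "x" <;> simp [hs, ih]

theorem shootLeft_eq (y : Int) (matrix : List (List String)) (targets targets_shot : List (Int × Int)) (cols : List Int) :
    shootLeft y matrix targets targets_shot cols =
      match firstHit matrix (cols.map (fun c => (y, c))) with
      | some p => ((PySem.List.remove? targets p).getD targets, targets_shot ++ [p])
      | none => (targets, targets_shot) := by
  induction cols with
  | nil => simp [shootLeft, firstHit]
  | cons c rest ih =>
    simp only [shootLeft, firstHit, List.map_cons, pvCell]
    cases h : (PySem.List.pyGet? matrix y).bind (fun row => PySem.List.pyGet? row c) with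
    | none => simp
    | some s => by_cases hs : s = "x" <;> simp [hs, ih]

theorem shootDown_eq (x : Int) (matrix : List (List String)) (targets targets_shot : List (Int × Int)) (rows : List Int) :
    shootDown x matrix targets targets_shot rows =
      match firstHit matrix (rows.map (fun r => (r, x))) with
      | some p => ((PySem.List.remove? targets p).getD targets, targets_shot ++ [p])
      | none => (targets, targets_shot) := by
  induction rows with
  | nil => simp [shootDown, firstHit]
  | cons r rest ih =>
    simp only [shootDown, firstHit, List.map_cons, pvCell]
    cases h : (PySem.List.pyGet? matrix r).bind (fun row => PySem.List.pyGet? row x) with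
    | none => simp
    | some s => by_cases hs : s = "x" <;> simp [hs, ih]

theorem shootUp_eq (x : Int) (matrix : List (List String)) (targets targets_shot : List (Int × Int)) (rows : List Int) :
    shootUp x matrix targets targets_shot rows =
      match firstHit matrix (rows.map (fun r => (r, x))) with
      | some p => ((PySem.List.remove? targets p).getD targets, targets_shot ++ [p])
      | none => (targets, targets_shot) := by
  induction rows with
  | nil => simp [shootUp, firstHit]
  | cons r rest ih =>
    simp only [shootUp, firstHit, List.map_cons, pvCell]
    cases h : (PySem.List.pyGet? matrix r).bind (fun row => PySem.List.pyGet? row x) with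
    | none => simp
    | some s => by_cases hs : s = "x" <;> simp [hs, ih]


-- pvPreScan unfolded one step: the head cell is readable, a head hit is removable,
-- and if the head is no hit the tail scan is again fine
theorem pvPreScan_cons (matrix : List (List String)) (targets : List (Int × Int)) (p : Int × Int) (rest : List (Int × Int))
    (h : pvPreScan matrix targets (p :: rest) = true) :
    (pvCell matrix p).isSome = true ∧
    (pvCell matrix p = some "x" → targets.contains p = true) ∧
    (pvCell matrix p ≠ some "x" → pvPreScan matrix targets rest = true) := by
  unfold pvPreScan at h
  rw [List.length_cons, List.range_succ_eq_map, List.all_cons, List.all_map, Bool.and_eq_true] at h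
  obtain ⟨h0, hrest⟩ := h
  simp only [List.range_zero, List.all_nil, List.getD_cons_zero] at h0
  rw [if_pos trivial, Bool.and_eq_true, Bool.or_eq_true, bne_iff_ne] at h0
  refine ⟨h0.1, ?_, ?_⟩
  · intro hx
    rcases h0.2 with hne | hc
    · exact absurd hx hne
    · exact hc
  · intro hne
    have hne' : (pvCell matrix p != some "x") = true := by simp [hne]
    unfold pvPreScan
    rw [List.all_eq_true]
    rw [List.all_eq_true] at hrest
    intro k hk
    have hmem : k ∈ List.range rest.length := hk
    have hk1 := hrest k hmem
    simp only [Function.comp_apply] at hk1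
    have hcond : ∀ m : Nat,
        ((List.range (m + 1)).all fun j => pvCell matrix ((p :: rest).getD j (0, 0)) != some "x") =
          ((List.range m).all fun j => pvCell matrix (rest.getD j (0, 0)) != some "x") := by
      intro m
      rw [List.range_succ_eq_map, List.all_cons, List.all_map]
      simp only [Function.comp_def, List.getD_cons_zero, List.getD_cons_succ]
      rw [hne', Bool.true_and]
    rw [show Nat.succ k = k + 1 from rfl, hcond k, List.getD_cons_succ] at hk1
    exact hk1

-- under pvPreScan, the first hit is the first index of 'x' among the materialised cell values
theorem firstHit_eq_index (matrix : List (List String)) (targets : List (Int × Int)) (ps : List (Int × Int))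
    (h : pvPreScan matrix targets ps = true) :
    firstHit matrix ps =
      (PySem.List.index? (ps.map (fun p => pvCell matrix p)) (some "x")).map
        (fun i => ps.getD i ((0 : Int), (0 : Int))) := by
  induction ps with
  | nil => simp [firstHit, PySem.List.index?]
  | cons p rest ih =>
    obtain ⟨hsome, _, htail⟩ := pvPreScan_cons matrix targets p rest h
    cases hc : pvCell matrix p with
    | none => simp [hc] at hsome
    | some s =>
      by_cases hx : s = "x"
      · subst hx
        rw [List.map_cons, hc, PySem.List.index?_cons_self]
        simp [firstHit, hc]
      · have hne : pvCell matrix p ≠ some "x" := by simp [hc, hx]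
        have hneq : (some s : Option String) ≠ some "x" := by simp [hx]
        rw [List.map_cons, hc, PySem.List.index?_cons_of_ne _ hneq, Option.map_map]
        simp only [firstHit, hc, if_neg hx]
        rw [ih (htail hne)]
        rcases PySem.List.index? (rest.map (fun p => pvCell matrix p)) (some "x") with _ | i <;> simp

-- proof-side name for B's shared update step on a scan list
def altCore (matrix : List (List String)) (targets targets_shot : List (Int × Int)) (cells : List (Int × Int)) : (List (Int × Int)) × (List (Int × Int)) :=
  match PySem.List.index? (cells.map (fun p => pvBcell matrix p.1 p.2)) (some "x") with
  | some i =>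
    ((PySem.List.remove? targets (PySem.List.pyGetD cells (i : Int) ((0 : Int), (0 : Int)))).getD targets,
      targets_shot ++ [PySem.List.pyGetD cells (i : Int) ((0 : Int), (0 : Int))])
  | none => (targets, targets_shot)

-- B's shared update step equals A's "first hit then update once" (needs Pre_ for that scan)
theorem alt_branch_eq (matrix : List (List String)) (targets targets_shot : List (Int × Int)) (cells : List (Int × Int))
    (h : pvPreScan matrix targets cells = true) :
    altCore matrix targets targets_shot cells =
      match firstHit matrix cells with
      | some p => ((PySem.List.remove? targets p).getD targets, targets_shot ++ [p])
      | none => (targets, targets_shot) := by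
  unfold altCore
  have hmap : cells.map (fun p => pvBcell matrix p.1 p.2) = cells.map (fun p => pvCell matrix p) := by
    simp [pvBcell, pvCell]
  rw [hmap, firstHit_eq_index matrix targets cells h]
  rcases PySem.List.index? (cells.map (fun p => pvCell matrix p)) (some "x") with _ | i
  · rfl
  · simp [PySem.List.pyGetD_natCast]
-- B's dispatch evaluated: the scan list each command selects
theorem alt_eq (command : String) (position : Int × Int) (matrix : List (List String)) (targets targets_shot : List (Int × Int)) :
    shooting_alt command position matrix targets targets_shot =
      altCore matrix targets targets_shot
        (if command = "right" then (PySem.List.pyRange 0 ((matrix.length : Int) - position.2) 1).map (fun k => (position.1 + k * 0, position.2 + k * 1))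
         else if command = "left" then (PySem.List.pyRange 0 position.2 1).map (fun k => (position.1 + k * 0, position.2 + k * (-1)))
         else if command = "down" then (PySem.List.pyRange 0 ((matrix.length : Int) - position.1) 1).map (fun k => (position.1 + k * 1, position.2 + k * 0))
         else if command = "up" then (PySem.List.pyRange 0 position.1 1).map (fun k => (position.1 + k * (-1), position.2 + k * 0))
         else []) := by
  unfold shooting_alt altCore
  by_cases h1 : command = "right"
  · simp [h1, PySem.Dict.ofList, PySem.Dict.update, PySem.Dict.getD_eq_get?_getD, PySem.Dict.get?_insert]
  · by_cases h2 : command = "left"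
    · simp [h2, PySem.Dict.ofList, PySem.Dict.update, PySem.Dict.getD_eq_get?_getD, PySem.Dict.get?_insert]
    · by_cases h3 : command = "down"
      · simp [h3, PySem.Dict.ofList, PySem.Dict.update, PySem.Dict.getD_eq_get?_getD, PySem.Dict.get?_insert]
      · by_cases h4 : command = "up"
        · simp [h4, PySem.Dict.ofList, PySem.Dict.update, PySem.Dict.getD_eq_get?_getD]
        · simp [h1, h2, h3, h4, PySem.Dict.ofList, PySem.Dict.update, PySem.Dict.getD_eq_get?_getD,
            PySem.Dict.get?_insert, PySem.List.pyRange, PySem.List.index?]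

-- the two scan sequences are the same list of positions, branch by branch
theorem cells_right (y x n : Int) :
    (PySem.List.pyRange 0 (n - x) 1).map (fun k => (y + k * 0, x + k * 1)) =
      (PySem.List.pyRange x n 1).map (fun c => (y, c)) := by
  rw [PySem.List.pyRange_one 0 (n - x), PySem.List.pyRange_one x n]
  simp only [List.map_map, Int.sub_zero]
  apply List.map_congr_left
  intro k _
  simp only [Function.comp, Prod.mk.injEq]
  constructor <;> ring

theorem cells_left (y x : Int) :
    (PySem.List.pyRange 0 x 1).map (fun k => (y + k * 0, x + k * (-1))) =
      (PySem.List.pyRange x 0 (-1)).map (fun c => (y, c)) := by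
  rw [PySem.List.pyRange_one 0 x, PySem.List.pyRange_neg_one x 0]
  simp only [List.map_map, Int.sub_zero]
  apply List.map_congr_left
  intro k _
  simp only [Function.comp, Prod.mk.injEq]
  constructor <;> ring

theorem cells_down (y x n : Int) :
    (PySem.List.pyRange 0 (n - y) 1).map (fun k => (y + k * 1, x + k * 0)) =
      (PySem.List.pyRange y n 1).map (fun r => (r, x)) := by
  rw [PySem.List.pyRange_one 0 (n - y), PySem.List.pyRange_one y n]
  simp only [List.map_map, Int.sub_zero]
  apply List.map_congr_left
  intro k _
  simp only [Function.comp, Prod.mk.injEq]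
  constructor <;> ring

theorem cells_up (y x : Int) :
    (PySem.List.pyRange 0 y 1).map (fun k => (y + k * (-1), x + k * 0)) =
      (PySem.List.pyRange y 0 (-1)).map (fun r => (r, x)) := by
  rw [PySem.List.pyRange_one 0 y, PySem.List.pyRange_neg_one y 0]
  simp only [List.map_map, Int.sub_zero]
  apply List.map_congr_left
  intro k _
  simp only [Function.comp, Prod.mk.injEq]
  constructor <;> ring

-- ===== VERDICT (by name: the statement is the Claim_ definition above) =====
theorem shooting_spec : Claim_equal_shooting := by
  intro command position matrix targets targets_shot _ hpre
  obtain ⟨hR, hL, hD, hU⟩ := hpre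
  unfold Spec_shooting
  rw [alt_eq]
  by_cases h1 : command = "right"
  · subst h1
    simp only [shooting, String.reduceEq, reduceIte]
    rw [cells_right position.1 position.2 (matrix.length : Int),
      alt_branch_eq matrix targets targets_shot _ (hR rfl), shootRight_eq]
  · by_cases h2 : command = "left"
    · subst h2
      simp only [shooting, String.reduceEq, reduceIte]
      rw [cells_left position.1 position.2,
        alt_branch_eq matrix targets targets_shot _ (hL rfl), shootLeft_eq]
    · by_cases h3 : command = "down"
      · subst h3
        simp only [shooting, String.reduceEq, reduceIte]
        rw [cells_down position.1 position.2 (matrix.length : Int),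
          alt_branch_eq matrix targets targets_shot _ (hD rfl), shootDown_eq]
      · by_cases h4 : command = "up"
        · subst h4
          simp only [shooting, String.reduceEq, reduceIte]
          rw [cells_up position.1 position.2,
            alt_branch_eq matrix targets targets_shot _ (hU rfl), shootUp_eq]
        · simp [shooting, altCore, h1, h2, h3, h4, PySem.List.index?]
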